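-- pv_equiv track=rewrite | github.com/balaganeshbaskar/manipulator_ws | src/manipulator/scripts/teensy_executor.py | assign_motion_types
-- ===== SOURCE A (Python) =====
-- def assign_motion_types(waypoints):
--     """
--     Assign START/VIA/STOP motion types to waypoints
--
--     Motion Types:
--     0 = START - First waypoint, clears buffer, begins new trajectory
--     1 = VIA   - Intermediate waypoint, blends motion
--     2 = STOP  - Final waypoint, decelerates to stop
--     3 = ABORT - Emergency stop, clears buffer (handled separately)
--
--     Returns list of (positions, motion_type) tuples
--     """
--     if len(waypoints) == 0:
--         return []
--
--     result = []
--     for i, wp in enumerate(waypoints):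
--         if i == 0:
--             motion_type = 0  # START - clears old buffer
--         elif i == len(waypoints) - 1:
--             motion_type = 2  # STOP
--         else:
--             motion_type = 1  # VIA
--
--         result.append((wp, motion_type))
--
--     return result
-- ===== SOURCE B (Python) =====
-- def assign_motion_types(waypoints):
--     # Build back-to-front: iterate in reverse so the STOP label needs no
--     # index/length comparison (the first element emitted is the last
--     # waypoint), then reverse and patch the head to START.
--     out = []
--     for wp in reversed(waypoints):
--         out.append((wp, 2 if not out else 1))
--     out.reverse()
--     if out:
--         out[0] = (out[0][0], 0)
--     return out
-- ===== Notes on version B (the rewrite author's own statement) =====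
-- stated objective: alternative
-- what changed: Builds the result back-to-front: a reverse-order pass labels the first emitted element STOP and all others VIA (testing only whether the accumulator is empty, no index or length comparisons per element), then the list is reversed and the head patched to START; A instead enumerates forward and branches on i==0 / i==len-1 at every element.
import Mathlib
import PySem

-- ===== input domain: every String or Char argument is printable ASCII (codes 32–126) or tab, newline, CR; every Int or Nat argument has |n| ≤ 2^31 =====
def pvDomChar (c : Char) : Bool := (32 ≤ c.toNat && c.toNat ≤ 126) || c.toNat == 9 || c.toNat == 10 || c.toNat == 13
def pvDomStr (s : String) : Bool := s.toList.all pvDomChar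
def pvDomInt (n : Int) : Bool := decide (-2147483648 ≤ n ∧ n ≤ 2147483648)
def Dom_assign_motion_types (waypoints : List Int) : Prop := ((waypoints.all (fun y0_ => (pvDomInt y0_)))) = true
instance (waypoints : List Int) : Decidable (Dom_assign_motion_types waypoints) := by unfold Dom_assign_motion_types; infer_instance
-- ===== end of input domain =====

-- B builds the labelled list back-to-front (reverse pass, then reverse and patch the head to START),
-- where A enumerates forward branching on i==0 / i==len-1 (objective: alternative).

-- ===== PORT A =====
-- literal transliteration: enumerate loop appending (wp, motion_type) per index
def assign_motion_types (waypoints : List Int) : List (Int × Int) :=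
  if waypoints.length = 0 then []
  else
    (PySem.List.enumerate waypoints).foldl
      (fun result p =>
        let motion_type : Int :=
          if p.1 = 0 then 0
          else if p.1 = (waypoints.length : Int) - 1 then 2
          else 1
        result ++ [(p.2, motion_type)]) []

-- ===== PORT B =====
-- loop body: out.append((wp, 2 if not out else 1))
def pvStep (out : List (Int × Int)) (wp : Int) : List (Int × Int) :=
  out ++ [(wp, if out = [] then (2 : Int) else 1)]

-- 'if out: out[0] = (out[0][0], 0)'
def pvPatch : List (Int × Int) → List (Int × Int)
  | [] => []
  | (x, _) :: t => (x, 0) :: t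

def assign_motion_types_alt (waypoints : List Int) : List (Int × Int) :=
  pvPatch (waypoints.reverse.foldl pvStep []).reverse

-- ===== PRECONDITION & SPEC =====
def Spec_assign_motion_types (waypoints : List Int) (out : List (Int × Int)) : Prop := out = assign_motion_types_alt waypoints
instance (waypoints : List Int) (out : List (Int × Int)) : Decidable (Spec_assign_motion_types waypoints out) := by unfold Spec_assign_motion_types; infer_instance

-- ===== CLAIM (what is proved, stated in full; the proofs are below) =====
def Claim_equal_assign_motion_types : Prop := ∀ (waypoints : List Int), Dom_assign_motion_types waypoints → Spec_assign_motion_types waypoints (assign_motion_types waypoints)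

-- ===== LEMMAS AND PROOFS =====

theorem pvFold_ne_nil (t : List Int) (a : List (Int × Int)) (ha : a ≠ []) :
    t.foldl pvStep a = a ++ t.map (fun w => (w, (1 : Int))) := by
  induction t generalizing a with
  | nil => simp
  | cons w t ih =>
    simp only [List.foldl_cons, List.map_cons]
    rw [show pvStep a w = a ++ [(w, 1)] by simp [pvStep, ha]]
    rw [ih (a ++ [(w, 1)]) (by simp)]
    simp

theorem pvFold_cons (r : Int) (t : List Int) :
    (r :: t).foldl pvStep [] = (r, (2 : Int)) :: t.map (fun w => (w, (1 : Int))) := by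
  simp only [List.foldl_cons]
  rw [show pvStep [] r = [(r, 2)] by simp [pvStep]]
  rw [pvFold_ne_nil t [(r, 2)] (by simp)]
  simp

theorem alt_key (ws : List Int) (h : ws ≠ []) :
    assign_motion_types_alt ws =
      pvPatch (ws.dropLast.map (fun w => (w, (1 : Int))) ++ [(ws.getLast h, 2)]) := by
  have hrev : ws.reverse = ws.getLast h :: ws.dropLast.reverse := by
    conv_lhs => rw [← List.dropLast_append_getLast h]
    simp
  unfold assign_motion_types_alt
  rw [hrev, pvFold_cons]
  simp [List.map_reverse]

theorem alt_length (ws : List Int) : (assign_motion_types_alt ws).length = ws.length := by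
  cases ws with
  | nil => simp [assign_motion_types_alt, pvPatch]
  | cons x rest =>
    rw [alt_key (x :: rest) (by simp)]
    cases hd : (x :: rest).dropLast with
    | nil =>
      have : rest = [] := by
        cases rest with
        | nil => rfl
        | cons y t => simp [List.dropLast] at hd
      subst this; simp [pvPatch]
    | cons d dt =>
      have hlen := congrArg List.length hd
      simp only [List.length_dropLast, List.length_cons] at hlen
      simp [pvPatch]
      omega

theorem alt_getElem (ws : List Int) (i : Nat) (hi : i < ws.length)
    (h : i < (assign_motion_types_alt ws).length) :
    (assign_motion_types_alt ws)[i] =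
      (ws[i], if i = 0 then (0 : Int) else if i = ws.length - 1 then 2 else 1) := by
  cases ws with
  | nil => simp at hi
  | cons x rest =>
    have hne : (x :: rest) ≠ ([] : List Int) := by simp
    have key := alt_key (x :: rest) hne
    cases rest with
    | nil =>
      have hi0 : i = 0 := Nat.lt_one_iff.mp hi
      subst hi0
      simp [key, pvPatch]
    | cons y t =>
      rw [List.dropLast_cons₂, List.map_cons, List.cons_append] at key
      simp only [pvPatch] at key
      simp only [key]
      cases i with
      | zero => simp
      | succ j =>
        simp only [List.getElem_cons_succ]
        have hlen : ((y :: t).dropLast.map (fun w => (w, (1 : Int)))).length = t.length := by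
          simp
        by_cases hj : j < t.length
        · rw [List.getElem_append_left (by omega)]
          rw [List.getElem_map, List.getElem_dropLast]
          have h0 : ¬ (j + 1 = 0) := by omega
          have h1 : ¬ (j + 1 = (x :: y :: t).length - 1) := by simp; omega
          simp only [h0, h1, if_false]
        · have hj' : j = t.length := by
            simp only [List.length_cons] at hi
            omega
          subst hj'
          have h1 : t.length + 1 = (x :: y :: t).length - 1 := by simp
          have h0 : ¬ (t.length + 1 = 0) := by omega
          have hlast : (x :: y :: t).getLast hne = (y :: t)[t.length]'(by simp) := by
            rw [List.getLast_eq_getElem]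
            have hix : (x :: y :: t).length - 1 = t.length + 1 := by simp
            simp only [hix, List.getElem_cons_succ]
            rfl
          rw [List.getElem_append_right (by omega)]
          simp only [hlen, Nat.sub_self, List.getElem_cons_zero]
          rw [hlast, if_neg h0, if_pos h1]
          rfl

theorem assign_motion_types_eq (waypoints : List Int) :
    assign_motion_types waypoints = assign_motion_types_alt waypoints := by
  unfold assign_motion_types
  by_cases h0 : waypoints.length = 0
  · rw [if_pos h0]
    cases waypoints with
    | nil => simp [assign_motion_types_alt, pvPatch]
    | cons x rest => simp at h0
  · rw [if_neg h0, PySem.List.foldl_append_singleton_eq_map]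
    simp only [List.nil_append]
    apply List.ext_getElem
    · simp [PySem.List.length_enumerate, alt_length]
    · intro i hA hB
      have hi : i < waypoints.length := by
        simpa [PySem.List.length_enumerate] using hA
      rw [List.getElem_map, PySem.List.getElem_enumerate]
      simp only [zero_add]
      rw [alt_getElem waypoints i hi hB]
      simp only [Prod.mk.injEq]
      refine ⟨trivial, ?_⟩
      by_cases hz : i = 0
      · simp [hz]
      · have hzi : ¬ ((i : Int) = 0) := by exact_mod_cast hz
        rw [if_neg hzi, if_neg hz]
        by_cases hl : i = waypoints.length - 1
        · have hli : (i : Int) = (waypoints.length : Int) - 1 := by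
            subst hl; omega
          rw [if_pos hli, if_pos hl]
        · have hli : ¬ ((i : Int) = (waypoints.length : Int) - 1) := by omega
          rw [if_neg hli, if_neg hl]

-- ===== VERDICT (by name: the statement is the Claim_ definition above) =====
theorem assign_motion_types_spec : Claim_equal_assign_motion_types := by
  intro waypoints _
  unfold Spec_assign_motion_types
  exact assign_motion_types_eq waypoints
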